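-- pv_equiv track=rewrite | github.com/malaonda222/Python | Esercizi/RECUPERO/Liste_Tuple_Dizionari/es_1.py | convert
-- ===== SOURCE A (Python) =====
-- def convert(list_1: list[tuple]) -> dict:
--     diz = {}
--     for element in list_1:
--         key, value = element[0], element[1]
--         if key in diz:
--             diz[key] += value
--         else:
--             diz[key] = value
--     return diz
-- ===== SOURCE B (Python) =====
-- def convert(list_1: list[tuple]) -> dict:
--     seen = []
--     for element in list_1:
--         if element[0] not in seen:
--             seen.append(element[0])
--     return {k: sum(v for key, v in list_1 if key == k) for k in seen}
-- ===== Notes on version B (the rewrite author's own statement) =====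
-- stated objective: alternative
-- what changed: Instead of one pass mutating a running dict (branching on key presence), B first collects the distinct keys in first-occurrence order and then builds the dict in one comprehension, summing each key's values by a per-key scan of the input.
import Mathlib
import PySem

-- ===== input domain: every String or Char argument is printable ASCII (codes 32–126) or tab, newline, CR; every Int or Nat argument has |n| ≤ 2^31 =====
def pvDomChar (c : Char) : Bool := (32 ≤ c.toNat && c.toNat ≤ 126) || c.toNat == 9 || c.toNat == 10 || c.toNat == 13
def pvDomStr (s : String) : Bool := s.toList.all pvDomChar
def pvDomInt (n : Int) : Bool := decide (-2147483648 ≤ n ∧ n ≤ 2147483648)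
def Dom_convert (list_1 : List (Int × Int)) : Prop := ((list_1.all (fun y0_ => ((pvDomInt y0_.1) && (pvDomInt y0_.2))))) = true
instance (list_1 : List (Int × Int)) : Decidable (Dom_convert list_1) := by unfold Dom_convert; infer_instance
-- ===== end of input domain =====

-- B aggregates by first collecting distinct keys, then summing per key; same result as A's running dict (objective: alternative decomposition).

-- ===== PORT A =====
-- one pass: dict starts empty; existing key gets value added in place, new key appended
def convert (list_1 : List (Int × Int)) : List (Int × Int) :=
  (list_1.foldl (fun diz p =>
      if diz.contains p.1 then diz.insert p.1 (diz.getD p.1 0 + p.2)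
      else diz.insert p.1 p.2) (PySem.Dict.empty : PySem.Dict Int Int)).items

-- ===== PORT B =====
-- pass 1: distinct keys in first-occurrence order; pass 2: dict comprehension, per-key sum of values
def convert_alt (list_1 : List (Int × Int)) : List (Int × Int) :=
  let seen : PySem.Set Int := list_1.foldl (fun s p => PySem.Set.add s p.1) (PySem.Set.empty)
  seen.map (fun k => (k, ((list_1.filter (fun p => p.1 == k)).map (·.2)).foldl (· + ·) 0))

-- ===== PRECONDITION & SPEC =====
def Spec_convert (list_1 : List (Int × Int)) (out : List (Int × Int)) : Prop := out = convert_alt list_1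
instance (list_1 : List (Int × Int)) (out : List (Int × Int)) : Decidable (Spec_convert list_1 out) := by unfold Spec_convert; infer_instance

-- ===== CLAIM (what is proved, stated in full; the proofs are below) =====
def Claim_equal_convert : Prop := ∀ (list_1 : List (Int × Int)), Dom_convert list_1 → Spec_convert list_1 (convert list_1)

-- ===== LEMMAS AND PROOFS =====

-- A's branch on key presence is exactly Python's d.modify (d[k] = f(d.get(k, 0)))
theorem convert_step_eq_modify (d : PySem.Dict Int Int) (p : Int × Int) :
    (if d.contains p.1 then d.insert p.1 (d.getD p.1 0 + p.2) else d.insert p.1 p.2)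
      = d.modify p.1 0 (· + p.2) := by
  by_cases h : d.contains p.1 = true
  · simp [PySem.Dict.modify, h]
  · simp only [Bool.not_eq_true] at h
    simp [PySem.Dict.modify, PySem.Dict.getD_of_not_contains _ _ h]

-- value accumulated at key k = initial value + left fold of the values carried by k in l
theorem getD_foldl_modify_addv (l : List (Int × Int)) (d : PySem.Dict Int Int) (k : Int) :
    (l.foldl (fun d p => d.modify p.1 0 (· + p.2)) d).getD k 0
      = ((l.filter (fun p => p.1 == k)).map (·.2)).foldl (· + ·) (d.getD k 0) := by
  induction l generalizing d with
  | nil => simp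
  | cons p t ih =>
    by_cases hk : p.1 = k
    · subst hk
      simp [List.foldl_cons, ih, PySem.Dict.getD_modify_self]
    · have h2 := PySem.Dict.getD_modify_of_ne (k := p.1) (k' := k) d 0 (· + p.2) (Ne.symm hk)
      simp [List.foldl_cons, ih, h2, hk]

-- ===== VERDICT (by name: the statement is the Claim_ definition above) =====
theorem convert_spec : Claim_equal_convert := by
  intro l _
  show convert l = convert_alt l
  unfold convert convert_alt
  have hstep : (l.foldl (fun diz p =>
      if diz.contains p.1 then diz.insert p.1 (diz.getD p.1 0 + p.2)
      else diz.insert p.1 p.2) (PySem.Dict.empty : PySem.Dict Int Int))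
      = l.foldl (fun d p => d.modify p.1 0 (· + p.2)) PySem.Dict.empty := by
    congr 1; funext d p; exact convert_step_eq_modify d p
  rw [hstep]
  set D := l.foldl (fun d p => d.modify p.1 0 (· + p.2)) (PySem.Dict.empty : PySem.Dict Int Int) with hD
  have hnd : D.keys.Nodup := by
    rw [hD]
    exact PySem.Dict.nodup_keys_foldl_modify_key l (·.1) 0 (fun d p => (· + p.2)) _ (by simp)
  have hkeys : D.keys = l.foldl (fun s p => PySem.Set.add s p.1) (PySem.Set.empty) := by
    rw [hD]
    rw [← PySem.Set.update_map_eq_foldl_add]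
    rw [PySem.Dict.keys_foldl_modify_key]
    simp [PySem.Set.empty]
  rw [PySem.Dict.items_eq_map_keys D hnd 0, hkeys]
  apply List.map_congr_left
  intro k _
  have := getD_foldl_modify_addv l PySem.Dict.empty k
  rw [← hD] at this
  simp only [PySem.Dict.getD_empty] at this
  rw [this]
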